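-- pv_equiv track=rewrite | github.com/architectdrone/shifting_symbols | switching_symbols.py | get_all_directional_vectors
-- ===== SOURCE A (Python) =====
-- def get_all_directional_vectors(tape):
--     '''
--     Extracts all directional vectors separated by pounds from the tape.
--     '''
--
--     x_axis = 0
--     y_axis = 0
--     reported_pound = False
--
--     all_directional_vectors = []
--     while True:
--         current_symbol = tape[0]
--         tape = tape[1:]
--
--         if current_symbol == '>':
--             reported_pound = False
--             x_axis+=1
--         elif current_symbol == '<':
--             reported_pound = False
--             x_axis-=1
--         elif current_symbol == '/':
--             reported_pound = False
--             y_axis-=1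
--         elif current_symbol == '^':
--             reported_pound = False
--             y_axis+=1
--         elif current_symbol == '#' and reported_pound == False:
--             all_directional_vectors.append((x_axis,y_axis))
--             x_axis = y_axis = 0
--
--         if tape == []:
--             if current_symbol != '#': #This means that the last directional vector is actually part of the first, wack I know
--                 if all_directional_vectors == []: # Unless no directional vectors were ever added.
--                     all_directional_vectors.append((x_axis,y_axis))
--                 first_vector = all_directional_vectors[0]
--                 all_directional_vectors[0] = (first_vector[0]+x_axis, first_vector[1]+y_axis)
--             break
--
--     return all_directional_vectors
-- ===== SOURCE B (Python) =====
-- def get_all_directional_vectors(tape):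
--     deltas = {'>': (1, 0), '<': (-1, 0), '/': (0, -1), '^': (0, 1)}
--     segments = []
--     current = []
--     for symbol in tape:
--         if symbol == '#':
--             segments.append(current)
--             current = []
--         else:
--             current.append(symbol)
--
--     def vec(seg):
--         x = y = 0
--         for s in seg:
--             dx, dy = deltas.get(s, (0, 0))
--             x += dx
--             y += dy
--         return (x, y)
--
--     vectors = [vec(seg) for seg in segments]
--     tail = vec(current)
--     if tape[-1] != '#':
--         if not vectors:
--             vectors.append(tail)
--         first = vectors[0]
--         vectors[0] = (first[0] + tail[0], first[1] + tail[1])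
--     return vectors
-- ===== Notes on version B (the rewrite author's own statement) =====
-- stated objective: faster
-- what changed: B replaces A's destructive while-loop (which re-slices the remaining tape with tape[1:] every iteration, quadratic copying) by a two-phase decomposition: one pass splits the tape into '#'-separated segments, each segment is mapped to its summed delta vector via a lookup dict, then the merge-trailing-vector finalisation is applied.
-- outside the precondition, e.g. on get_all_directional_vectors([]): A raises IndexError, B raises IndexError
import Mathlib
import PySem

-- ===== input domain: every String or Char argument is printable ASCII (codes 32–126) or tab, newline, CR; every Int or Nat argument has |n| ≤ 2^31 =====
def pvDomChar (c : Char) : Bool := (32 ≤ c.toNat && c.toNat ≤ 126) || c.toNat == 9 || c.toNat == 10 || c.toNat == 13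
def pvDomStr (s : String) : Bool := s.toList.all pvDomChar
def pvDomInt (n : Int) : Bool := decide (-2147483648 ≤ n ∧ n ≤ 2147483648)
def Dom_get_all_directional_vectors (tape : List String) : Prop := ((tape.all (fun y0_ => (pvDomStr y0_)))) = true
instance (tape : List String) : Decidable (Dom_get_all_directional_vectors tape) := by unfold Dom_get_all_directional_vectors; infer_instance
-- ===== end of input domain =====

-- B re-implements A by a different decomposition: split the tape into '#'-separated
-- segments in one pass, map each segment to its summed delta vector, then apply the
-- merge-trailing-vector finalisation; avoids A's per-iteration tape[1:] copying
-- (measured faster in a timing run); same values wherever A returns.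

-- ===== PORT A =====
-- one iteration of A's while-body up to (and including) the elif chain:
-- returns the updated (x_axis, y_axis, reported_pound, all_directional_vectors)
def pvAStep (cur : String) (x y : Int) (rp : Bool) (acc : List (Int × Int)) :
    Int × Int × Bool × List (Int × Int) :=
  if cur == ">" then (x + 1, y, false, acc)
  else if cur == "<" then (x - 1, y, false, acc)
  else if cur == "/" then (x, y - 1, false, acc)
  else if cur == "^" then (x, y + 1, false, acc)
  else if cur == "#" && rp == false then (0, 0, rp, acc ++ [(x, y)])
  else (x, y, rp, acc)

-- the 'if tape == []' epilogue of A (current_symbol ≠ '#' case)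
def pvAFinish (acc : List (Int × Int)) (x y : Int) : List (Int × Int) :=
  let acc := if acc = [] then acc ++ [(x, y)] else acc
  match acc with
  | [] => []                                  -- unreachable
  | (fx, fy) :: t => (fx + x, fy + y) :: t

-- A's while-True loop; the [] case is unreachable from a nonempty tape
-- (Python raises IndexError on an empty tape; Pre_ excludes that input)
def pvALoop : List String → Int → Int → Bool → List (Int × Int) → List (Int × Int)
  | [], _, _, _, acc => acc
  | cur :: rest, x, y, rp, acc =>
    match pvAStep cur x y rp acc with
    | (x, y, rp, acc) =>
      if rest = [] then
        if cur ≠ "#" then pvAFinish acc x y else acc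
      else pvALoop rest x y rp acc

def get_all_directional_vectors (tape : List String) : List (Int × Int) :=
  pvALoop tape 0 0 false []

-- ===== PORT B =====
def pvDeltas : PySem.Dict String (Int × Int) :=
  PySem.Dict.ofList [(">", (1, 0)), ("<", (-1, 0)), ("/", (0, -1)), ("^", (0, 1))]

-- B's helper vec(seg): sum of deltas of a segment
def pvVec (seg : List String) : Int × Int :=
  seg.foldl (fun p s =>
    let d := pvDeltas.getD s (0, 0)
    (p.1 + d.1, p.2 + d.2)) (0, 0)

def get_all_directional_vectors_alt (tape : List String) : List (Int × Int) :=
  -- the segment-building for-loop: state (segments, current)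
  let st := tape.foldl
    (fun (st : List (List String) × List String) symbol =>
      if symbol == "#" then (st.1 ++ [st.2], []) else (st.1, st.2 ++ [symbol]))
    ([], [])
  let vectors := st.1.map pvVec
  let tail := pvVec st.2
  match PySem.List.pyGet? tape (-1) with   -- tape[-1]; none = IndexError, outside Pre_
  | none => []
  | some last =>
    if last ≠ "#" then
      let vectors := if vectors = [] then vectors ++ [tail] else vectors
      match vectors with
      | [] => []                            -- unreachable
      | (fx, fy) :: t => (fx + tail.1, fy + tail.2) :: t
    else vectors

-- ===== PRECONDITION & SPEC =====
-- Pre_ excludes only the empty tape, on which Python A raises IndexError (tape[0]).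
def Pre_get_all_directional_vectors (tape : List String) : Prop := tape ≠ []
instance (tape : List String) : Decidable (Pre_get_all_directional_vectors tape) := by unfold Pre_get_all_directional_vectors; infer_instance
def pvWitness_get_all_directional_vectors : List String := [">", "#", "^"]

def Spec_get_all_directional_vectors (tape : List String) (out : List (Int × Int)) : Prop := out = get_all_directional_vectors_alt tape
instance (tape : List String) (out : List (Int × Int)) : Decidable (Spec_get_all_directional_vectors tape out) := by unfold Spec_get_all_directional_vectors; infer_instance

-- ===== CLAIM (what is proved, stated in full; the proofs are below) =====
def Claim_equal_get_all_directional_vectors : Prop := ∀ (tape : List String), Dom_get_all_directional_vectors tape → Pre_get_all_directional_vectors tape → Spec_get_all_directional_vectors tape (get_all_directional_vectors tape)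

-- ===== LEMMAS AND PROOFS =====

/-- Reference recursion: processing `tape` from accumulated `(x, y)` yields
    (emitted vectors, final x, final y). -/
def pvRun : List String → Int → Int → List (Int × Int) × Int × Int
  | [], x, y => ([], x, y)
  | s :: rest, x, y =>
    if s = ">" then pvRun rest (x + 1) y
    else if s = "<" then pvRun rest (x - 1) y
    else if s = "/" then pvRun rest x (y - 1)
    else if s = "^" then pvRun rest x (y + 1)
    else if s = "#" then
      match pvRun rest 0 0 with
      | (v, fx, fy) => ((x, y) :: v, fx, fy)
    else pvRun rest x y

/-- One step of A's loop body corresponds to one step of the reference recursion. -/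
theorem pvStep_run (s : String) (rest : List String) (x y : Int) (acc : List (Int × Int)) :
    ∃ x' y' e, pvAStep s x y false acc = (x', y', false, acc ++ e) ∧
      pvRun (s :: rest) x y =
        (e ++ (pvRun rest x' y').1, (pvRun rest x' y').2.1, (pvRun rest x' y').2.2) := by
  by_cases h1 : s = ">"
  · subst h1; exact ⟨x + 1, y, [], by simp [pvAStep], by simp [pvRun]⟩
  by_cases h2 : s = "<"
  · subst h2; exact ⟨x - 1, y, [], by simp [pvAStep], by simp [pvRun]⟩
  by_cases h3 : s = "/"
  · subst h3; exact ⟨x, y - 1, [], by simp [pvAStep], by simp [pvRun]⟩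
  by_cases h4 : s = "^"
  · subst h4; exact ⟨x, y + 1, [], by simp [pvAStep], by simp [pvRun]⟩
  by_cases h5 : s = "#"
  · subst h5; exact ⟨0, 0, [(x, y)], by simp [pvAStep],
      by cases h : pvRun rest 0 0 with
         | mk v p => simp [pvRun, h]⟩
  · exact ⟨x, y, [], by simp [pvAStep, h1, h2, h3, h4, h5],
      by simp [pvRun, h1, h2, h3, h4, h5]⟩

theorem pvALoop_eq_run : ∀ (tape : List String) (x y : Int) (acc : List (Int × Int)),
    tape ≠ [] →
    pvALoop tape x y false acc =
      (if tape.getLast? ≠ some "#" then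
        pvAFinish (acc ++ (pvRun tape x y).1) (pvRun tape x y).2.1 (pvRun tape x y).2.2
      else acc ++ (pvRun tape x y).1) := by
  intro tape
  induction tape with
  | nil => intro _ _ _ h; exact absurd rfl h
  | cons s rest ih =>
    intro x y acc _
    obtain ⟨x', y', e, hstep, hrun⟩ := pvStep_run s rest x y acc
    cases rest with
    | nil =>
      have h0 : pvRun ([] : List String) x' y' = ([], x', y') := rfl
      rw [h0] at hrun
      simp only [pvALoop, hstep, hrun, List.getLast?_singleton]
      by_cases h5 : s = "#" <;> simp [h5, pvAFinish]
    | cons t rest' =>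
      have hne : t :: rest' ≠ [] := by simp
      have hlast : (s :: t :: rest').getLast? = (t :: rest').getLast? :=
        List.getLast?_cons_cons ..
      have hL : pvALoop (s :: t :: rest') x y false acc =
          pvALoop (t :: rest') x' y' false (acc ++ e) := by
        rw [pvALoop, hstep]
        simp
      rw [hL, ih _ _ _ hne, hrun, hlast]
      simp [List.append_assoc]

theorem pvVec_nil : pvVec [] = (0, 0) := rfl

theorem pvVec_append (seg : List String) (s : String) :
    pvVec (seg ++ [s]) =
      ((pvVec seg).1 + (pvDeltas.getD s (0, 0)).1,
       (pvVec seg).2 + (pvDeltas.getD s (0, 0)).2) := by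
  simp [pvVec, List.foldl_append]

theorem pvDeltas_getD (s : String) :
    pvDeltas.getD s (0, 0) =
      (if s = ">" then ((1 : Int), (0 : Int))
       else if s = "<" then (-1, 0)
       else if s = "/" then (0, -1)
       else if s = "^" then (0, 1)
       else (0, 0)) := by
  by_cases h1 : s = ">"
  · subst h1; decide
  by_cases h2 : s = "<"
  · subst h2; decide
  by_cases h3 : s = "/"
  · subst h3; decide
  by_cases h4 : s = "^"
  · subst h4; decide
  · have hit : pvDeltas.items = [(">", ((1 : Int), (0 : Int))), ("<", (-1, 0)), ("/", (0, -1)), ("^", (0, 1))] := by decide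
    have b1 : ((">" : String) == s) = false := beq_eq_false_iff_ne.mpr (Ne.symm h1)
    have b2 : (("<" : String) == s) = false := beq_eq_false_iff_ne.mpr (Ne.symm h2)
    have b3 : (("/" : String) == s) = false := beq_eq_false_iff_ne.mpr (Ne.symm h3)
    have b4 : (("^" : String) == s) = false := beq_eq_false_iff_ne.mpr (Ne.symm h4)
    simp [PySem.Dict.getD, PySem.Dict.get?, hit, List.find?, b1, b2, b3, b4, h1, h2, h3, h4]

theorem pvFold_eq_run : ∀ (tape : List String) (segs : List (List String)) (cur : List String),
    (tape.foldl
        (fun (st : List (List String) × List String) symbol =>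
          if symbol == "#" then (st.1 ++ [st.2], []) else (st.1, st.2 ++ [symbol]))
        (segs, cur)).1.map pvVec =
      segs.map pvVec ++ (pvRun tape (pvVec cur).1 (pvVec cur).2).1
    ∧ pvVec (tape.foldl
        (fun (st : List (List String) × List String) symbol =>
          if symbol == "#" then (st.1 ++ [st.2], []) else (st.1, st.2 ++ [symbol]))
        (segs, cur)).2 =
      ((pvRun tape (pvVec cur).1 (pvVec cur).2).2.1,
       (pvRun tape (pvVec cur).1 (pvVec cur).2).2.2) := by
  intro tape
  induction tape with
  | nil => intro segs cur; constructor <;> simp [pvRun]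
  | cons s rest ih =>
    intro segs cur
    have hd := pvVec_append cur s
    rw [pvDeltas_getD s] at hd
    by_cases h5 : s = "#"
    · subst h5
      obtain ⟨ih1, ih2⟩ := ih (segs ++ [cur]) []
      simp only [pvVec_nil] at ih1 ih2
      cases hr : pvRun rest 0 0 with
      | mk v p =>
        rw [hr] at ih1 ih2
        constructor <;> simp_all [pvRun]
    by_cases h1 : s = ">"
    · subst h1
      obtain ⟨ih1, ih2⟩ := ih segs (cur ++ [">"])
      simp only [hd] at ih1 ih2
      constructor <;> simp_all [pvRun]
    by_cases h2 : s = "<"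
    · subst h2
      obtain ⟨ih1, ih2⟩ := ih segs (cur ++ ["<"])
      simp only [hd] at ih1 ih2
      constructor <;> simp_all [pvRun, sub_eq_add_neg]
    by_cases h3 : s = "/"
    · subst h3
      obtain ⟨ih1, ih2⟩ := ih segs (cur ++ ["/"])
      simp only [hd] at ih1 ih2
      constructor <;> simp_all [pvRun, sub_eq_add_neg]
    by_cases h4 : s = "^"
    · subst h4
      obtain ⟨ih1, ih2⟩ := ih segs (cur ++ ["^"])
      simp only [hd] at ih1 ih2
      constructor <;> simp_all [pvRun]
    · obtain ⟨ih1, ih2⟩ := ih segs (cur ++ [s])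
      simp only [hd, h1, h2, h3, h4, if_false, add_zero] at ih1 ih2
      constructor <;> simp_all [pvRun]

-- ===== VERDICT (by name: the statement is the Claim_ definition above) =====
theorem get_all_directional_vectors_spec : Claim_equal_get_all_directional_vectors := by
  intro tape _ hpre
  unfold Spec_get_all_directional_vectors get_all_directional_vectors get_all_directional_vectors_alt
  obtain ⟨last, hlast⟩ : ∃ l, tape.getLast? = some l := by
    cases h : tape.getLast? with
    | none => exact absurd (List.getLast?_eq_none_iff.mp h) hpre
    | some l => exact ⟨l, rfl⟩
  have hget : PySem.List.pyGet? tape (-1) = some last := by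
    rw [PySem.List.pyGet?_neg_one, hlast]
  obtain ⟨hF1, hF2⟩ := pvFold_eq_run tape [] []
  simp only [pvVec_nil, List.map_nil, List.nil_append] at hF1 hF2
  rw [pvALoop_eq_run tape 0 0 [] hpre]
  simp only [hget, hF1, hF2, hlast, List.nil_append]
  by_cases h : last = "#" <;> simp [h, pvAFinish]
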